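-- pv_equiv track=rewrite | github.com/alexandraback/datacollection | solutions_5738606668808192_1/Python/SkyRaker/t1.py | jinzhi
-- ===== SOURCE A (Python) =====
-- def jinzhi(n,k):
--     s=[]
--     while(n!=0):
--         s.append(n%2)
--         n/=2
--         n=int(n)
--     if(len(s)==0):
--         s.append(0)
--     ret=0
--     while(len(s)!=0):
--         tmp=s.pop()
--         ret+=tmp*(k**len(s));
--     return ret
-- ===== SOURCE B (Python) =====
-- def jinzhi(n, k):
--     ret = 0
--     p = 1
--     while n > 0:
--         ret += (n % 2) * p
--         p *= k
--         n //= 2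
--     return ret
-- ===== Notes on version B (the rewrite author's own statement) =====
-- stated objective: simpler
-- what changed: Fused A's two loops (build a digit list by repeated float halving, then pop MSB-first recomputing k**len each step) into one LSB-first pass with a running power of k and no list; Pre_ excludes negative n, where A's truncating int(n/2) reduction produces an accidental value while B's digit loop simply never runs.
-- outside the precondition, e.g. on jinzhi(-2, 3): A returns 3, B returns 0; on jinzhi(-1, 5): A returns 1, B returns 0
import Mathlib
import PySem

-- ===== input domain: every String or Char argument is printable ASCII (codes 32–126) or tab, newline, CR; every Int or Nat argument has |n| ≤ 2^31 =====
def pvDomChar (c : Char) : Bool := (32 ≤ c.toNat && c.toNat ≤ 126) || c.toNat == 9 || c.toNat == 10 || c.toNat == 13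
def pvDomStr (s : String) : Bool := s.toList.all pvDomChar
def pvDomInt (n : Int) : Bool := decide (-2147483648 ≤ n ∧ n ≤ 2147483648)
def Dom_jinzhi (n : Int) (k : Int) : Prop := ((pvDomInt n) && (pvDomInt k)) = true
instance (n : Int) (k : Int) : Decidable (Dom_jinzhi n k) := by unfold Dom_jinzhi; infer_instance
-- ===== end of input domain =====

-- B fuses A's two loops into one LSB-first pass with a running power of k and no digit list (objective: simpler).
-- Python's 'n /= 2; n = int(n)' is exact truncating division toward zero for |n| ≤ 2^31 (float division by 2 is
-- exact there), ported as Int.tdiv.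

-- ===== PORT A =====
-- first while-loop: s.append(n % 2); n = int(n / 2)   (int(n/2) = truncation toward zero = Int.tdiv, exact on Dom)
def jinzhiLoop1 (n : Int) (s : List Int) : List Int :=
  if h : n ≠ 0 then jinzhiLoop1 (Int.tdiv n 2) (s ++ [PySem.Int.mod n 2]) else s
termination_by n.natAbs
decreasing_by
  have h2 : (Int.tdiv n 2).natAbs = n.natAbs / 2 := by rw [Int.natAbs_tdiv]; rfl
  omega

-- second while-loop: tmp = s.pop(); ret += tmp * k ** len(s)
def jinzhiLoop2 (k : Int) (s : List Int) (ret : Int) : Int :=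
  if h : s ≠ [] then
    jinzhiLoop2 k s.dropLast (ret + s.getLastD 0 * k ^ s.dropLast.length)
  else ret
termination_by s.length
decreasing_by
  have : 0 < s.length := List.length_pos_iff.mpr h
  simp [List.length_dropLast]; omega

def jinzhi (n : Int) (k : Int) : Int :=
  let s := jinzhiLoop1 n []
  let s := if s.length = 0 then s ++ [0] else s
  jinzhiLoop2 k s 0

-- ===== PORT B =====
-- B's single loop: while n > 0: ret += (n % 2) * p; p *= k; n //= 2
def jinzhiAltLoop (k : Int) (n : Int) (ret : Int) (p : Int) : Int :=
  if h : n > 0 then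
    jinzhiAltLoop k (PySem.Int.floordiv n 2) (ret + PySem.Int.mod n 2 * p) (p * k)
  else ret
termination_by n.toNat
decreasing_by
  have : PySem.Int.floordiv n 2 = n / 2 := by
    simp [PySem.Int.floordiv, Int.fdiv_eq_ediv]
  rw [this]; omega

def jinzhi_alt (n : Int) (k : Int) : Int :=
  jinzhiAltLoop k n 0 1

-- ===== PRECONDITION & SPEC =====
-- Pre_ excludes negative n, on which A's value is an accident of its truncating int(n/2) float
-- reduction (e.g. jinzhi(-2,3) = 3) while B's digit loop naturally never runs and returns 0.
def Pre_jinzhi (n : Int) (k : Int) : Prop := 0 ≤ n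
instance (n : Int) (k : Int) : Decidable (Pre_jinzhi n k) := by unfold Pre_jinzhi; infer_instance

def pvWitness_jinzhi : Int × Int := (5, 3)

def Spec_jinzhi (n : Int) (k : Int) (out : Int) : Prop := out = jinzhi_alt n k
instance (n : Int) (k : Int) (out : Int) : Decidable (Spec_jinzhi n k out) := by unfold Spec_jinzhi; infer_instance

-- ===== CLAIM (what is proved, stated in full; the proofs are below) =====
def Claim_equal_jinzhi : Prop := ∀ (n : Int) (k : Int), Dom_jinzhi n k → Pre_jinzhi n k → Spec_jinzhi n k (jinzhi n k)

-- ===== LEMMAS AND PROOFS =====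

-- the digit list A's first loop produces, without the accumulator
def jbits (n : Int) : List Int :=
  if h : n ≠ 0 then PySem.Int.mod n 2 :: jbits (Int.tdiv n 2) else []
termination_by n.natAbs
decreasing_by
  have h2 : (Int.tdiv n 2).natAbs = n.natAbs / 2 := by rw [Int.natAbs_tdiv]; rfl
  omega

-- value of a digit list, least-significant first: Σ s[i] * k^i
def jval (k : Int) : List Int → Int
  | [] => 0
  | d :: t => d + k * jval k t

theorem loop1_eq_bits (n : Int) (s : List Int) : jinzhiLoop1 n s = s ++ jbits n := by
  induction n using jbits.induct generalizing s with
  | case1 n hn ih =>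
      rw [jinzhiLoop1, jbits, dif_pos hn, dif_pos hn, ih]
      simp
  | case2 n hn =>
      rw [jinzhiLoop1, jbits, dif_neg hn, dif_neg hn]
      simp

theorem jval_append (k : Int) (l : List Int) (d : Int) :
    jval k (l ++ [d]) = jval k l + d * k ^ l.length := by
  induction l with
  | nil => simp [jval]
  | cons a t ih => simp [jval, ih]; ring

theorem loop2_eq (k : Int) (s : List Int) (ret : Int) :
    jinzhiLoop2 k s ret = ret + jval k s := by
  induction s using List.reverseRecOn generalizing ret with
  | nil => rw [jinzhiLoop2]; simp [jval]
  | append_singleton l d ih =>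
      rw [jinzhiLoop2]
      simp only [ne_eq, List.append_eq_nil_iff, List.cons_ne_nil, and_false,
        not_false_eq_true, dif_pos, List.dropLast_concat, List.getLastD_concat]
      rw [ih, jval_append]
      ring

-- for n ≥ 0, Python's floor division n // 2 coincides with A's truncation toward zero
theorem floordiv_eq_tdiv_of_nonneg (n : Int) (hn : 0 ≤ n) :
    PySem.Int.floordiv n 2 = Int.tdiv n 2 := by
  simp [PySem.Int.floordiv, Int.fdiv_eq_ediv, Int.tdiv_eq_ediv, hn]

theorem loopB_eq (k : Int) (n : Int) (hn : 0 ≤ n) (ret p : Int) :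
    jinzhiAltLoop k n ret p = ret + p * jval k (jbits n) := by
  induction n using jbits.induct generalizing ret p with
  | case1 n hn' ih =>
      have hpos : 0 < n := lt_of_le_of_ne hn (Ne.symm hn')
      rw [jinzhiAltLoop, dif_pos hpos, jbits, dif_pos hn',
        floordiv_eq_tdiv_of_nonneg n hn,
        ih (by have := Int.tdiv_nonneg hn (by norm_num : (0:Int) ≤ 2); exact this)]
      simp [jval]; ring
  | case2 n hn' =>
      rw [jinzhiAltLoop, dif_neg (by omega), jbits, dif_neg hn']
      simp [jval]

-- ===== VERDICT (by name: the statement is the Claim_ definition above) =====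
theorem jinzhi_spec : Claim_equal_jinzhi := by
  intro n k _ hpre
  unfold Spec_jinzhi jinzhi jinzhi_alt
  rw [loop1_eq_bits, loopB_eq k n hpre, loop2_eq]
  by_cases h : jbits n = []
  · simp [h, jval]
  · simp [h]
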